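-- pv_equiv track=rewrite | github.com/seawolf001/CP | UVA-Samsung/DFS/10926-how-many-deps.py | DFS
-- ===== SOURCE A (Python) =====
-- def DFS(adj, vis, s, deps):
--     #  import pdb;pdb.set_trace()
--     vis[s]=True
--     if s not in deps:
--         deps[s] = 0
--     if not adj[s]:
--         return deps[s]
--     for x in adj[s]:
--         if x not in vis:
--             deps[x] = DFS(adj, vis, x, deps)
--         deps[s] += deps[x]+1
--     return deps[s]
-- ===== SOURCE B (Python) =====
-- def DFS(adj, vis, s, deps):
--     # Iterative version: explicit stack of (node, neighbor-index) frames replaces recursion.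
--     vis[s] = True
--     if s not in deps:
--         deps[s] = 0
--     stack = [(s, 0)]
--     while stack:
--         u, i = stack.pop()
--         ns = adj[u]
--         if i >= len(ns):
--             continue
--         x = ns[i]
--         if x in vis:
--             deps[u] += deps[x] + 1
--             stack.append((u, i + 1))
--         else:
--             stack.append((u, i))   # revisit this neighbor after its subtree is done
--             vis[x] = True
--             if x not in deps:
--                 deps[x] = 0
--             stack.append((x, 0))
--     return deps[s]
-- ===== Notes on version B (the rewrite author's own statement) =====
-- stated objective: alternative
-- what changed: Replaces A's recursive DFS by an iterative while-loop over an explicit stack of (node, neighbour-index) frames that performs the same visits, mutations and accumulations in the same order without recursion.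
import Mathlib
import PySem

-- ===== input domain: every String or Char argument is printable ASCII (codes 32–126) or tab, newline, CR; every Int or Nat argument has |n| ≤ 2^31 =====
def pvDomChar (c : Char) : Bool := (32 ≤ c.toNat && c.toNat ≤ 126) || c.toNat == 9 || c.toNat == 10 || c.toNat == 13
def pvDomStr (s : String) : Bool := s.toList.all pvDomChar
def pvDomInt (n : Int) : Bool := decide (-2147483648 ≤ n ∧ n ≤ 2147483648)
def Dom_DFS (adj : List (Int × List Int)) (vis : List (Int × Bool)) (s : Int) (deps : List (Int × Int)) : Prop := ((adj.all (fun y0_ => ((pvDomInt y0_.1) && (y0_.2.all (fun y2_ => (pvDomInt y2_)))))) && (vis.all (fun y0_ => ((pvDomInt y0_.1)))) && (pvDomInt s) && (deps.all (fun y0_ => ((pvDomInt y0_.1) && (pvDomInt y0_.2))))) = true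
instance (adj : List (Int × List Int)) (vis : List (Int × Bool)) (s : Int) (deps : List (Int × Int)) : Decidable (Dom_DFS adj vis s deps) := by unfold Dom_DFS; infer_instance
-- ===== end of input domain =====

-- B replaces A's recursion by an explicit stack of (node, neighbour-index) frames (same mutations
-- of vis/deps in the same order; the equivalence proved here is about the RETURN value only).

-- ===== PORT A =====
-- A's recursion carries the mutated dicts explicitly; fuel totalises it (the Python recursion
-- depth is bounded by the number of adj keys, see `suffRec` below; `none` = KeyError).
mutual
def dfsA (adj : PySem.Dict Int (List Int)) (f : Nat) (s : Int)
    (vis : PySem.Dict Int Bool) (deps : PySem.Dict Int Int) :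
    Option (PySem.Dict Int Bool × PySem.Dict Int Int) :=
  match f with
  | 0 => none
  | g + 1 =>
    let vis1 := vis.insert s true                                      -- vis[s] = True
    let deps1 := if deps.contains s then deps else deps.insert s 0     -- if s not in deps: deps[s] = 0
    match adj.get? s with
    | none => none                                                     -- KeyError: adj[s]
    | some ns =>
      if ns = [] then some (vis1, deps1)                               -- if not adj[s]: return deps[s]
      else loopA adj g s ns vis1 deps1                                 -- for x in adj[s]: …
termination_by (f, 0)

def loopA (adj : PySem.Dict Int (List Int)) (f : Nat) (s : Int) :
    List Int → PySem.Dict Int Bool → PySem.Dict Int Int →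
    Option (PySem.Dict Int Bool × PySem.Dict Int Int)
  | [], vis, deps => some (vis, deps)
  | x :: xs, vis, deps =>
    if vis.contains x then
      match deps.get? x with
      | none => none                                                   -- KeyError: deps[x]
      | some dx =>
        loopA adj f s xs vis (deps.insert s (deps.getD s 0 + dx + 1))  -- deps[s] += deps[x]+1
    else
      match dfsA adj f x vis deps with
      | none => none
      | some (vis', deps') =>
        let r := deps'.getD x 0                                        -- the child's return value deps[x] (x is always a key)
        let deps'' := deps'.insert x r                                 -- deps[x] = DFS(adj, vis, x, deps)
        loopA adj f s xs vis' (deps''.insert s (deps''.getD s 0 + r + 1))  -- deps[s] += deps[x]+1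
termination_by xs _ _ => (f, xs.length + 1)
end

def DFS (adj : List (Int × List Int)) (vis : List (Int × Bool)) (s : Int) (deps : List (Int × Int)) : Int :=
  match dfsA (PySem.Dict.ofList adj) (adj.length + 1) s (PySem.Dict.ofList vis) (PySem.Dict.ofList deps) with
  | some (_, d) => d.getD s 0        -- return deps[s] (s is always a key of the final deps)
  | none => 0                        -- unreachable under Pre_DFS (Python raises there)

-- ===== PORT B =====
-- helpers for B's termination measure (number of unvisited adj keys, then remaining stack work)
def unvisB (adj : PySem.Dict Int (List Int)) (vis : PySem.Dict Int Bool) : Nat :=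
  (adj.keys.filter (fun k => !vis.contains k)).length

def frameW (adj : PySem.Dict Int (List Int)) (p : Int × Nat) : Nat :=
  match adj.get? p.1 with
  | some ns => ns.length - p.2
  | none => 0

def stackW (adj : PySem.Dict Int (List Int)) (st : List (Int × Nat)) : Nat :=
  (st.map (frameW adj)).sum

-- termination helper, cited by machB's decreasing_by
theorem filter_len_lt {α : Type} {l : List α} {p q : α → Bool}
    (himp : ∀ a, q a = true → p a = true) {x : α}
    (hx : x ∈ l) (hpx : p x = true) (hqx : q x = false) :
    (l.filter q).length < (l.filter p).length := by
  induction l with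
  | nil => cases hx
  | cons b t ih =>
    have hmono : (t.filter q).length ≤ (t.filter p).length :=
      (List.monotone_filter_right t (fun a ha => himp a ha)).length_le
    rcases List.mem_cons.1 hx with rfl | hbt
    · simp [List.filter_cons, hpx, hqx]
      omega
    · have h := ih hbt
      by_cases hqb : q b = true
      · simp [List.filter_cons, hqb, himp b hqb]
        omega
      · by_cases hpb : p b = true <;>
          simp [List.filter_cons, hqb, hpb, Bool.not_eq_true] <;> omega

-- termination helper, cited by machB's decreasing_by
theorem unvisB_insert_lt (adj : PySem.Dict Int (List Int)) (vis : PySem.Dict Int Bool)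
    {x : Int} (hx : adj.contains x = true) (hv : vis.contains x = false) :
    unvisB adj (vis.insert x true) < unvisB adj vis := by
  unfold unvisB
  refine filter_len_lt (p := fun k => !vis.contains k) (q := fun k => !(vis.insert x true).contains k)
    (fun a ha => ?_) ((PySem.Dict.contains_iff_mem_keys adj x).1 hx) (by simp [hv]) ?_
  · simp only [Bool.not_eq_true'] at ha ⊢
    rw [PySem.Dict.contains_insert] at ha
    exact (Bool.or_eq_false_iff.1 ha).2
  · simp [PySem.Dict.contains_insert]

-- B: the DFS as a while loop over an explicit stack of (node, neighbour-index) frames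
def machB (adj : PySem.Dict Int (List Int)) (st : List (Int × Nat))
    (vis : PySem.Dict Int Bool) (deps : PySem.Dict Int Int) :
    Option (PySem.Dict Int Bool × PySem.Dict Int Int) :=
  match st with
  | [] => some (vis, deps)
  | (u, i) :: rest =>
    match h : adj.get? u with
    | none => none                                                     -- KeyError: adj[u]
    | some ns =>
      if h2 : i < ns.length then
        if vis.contains ns[i] then
          match deps.get? ns[i] with
          | none => none                                               -- KeyError: deps[x]
          | some dx =>                                                 -- deps[u] += deps[x]+1
            machB adj ((u, i + 1) :: rest) vis (deps.insert u (deps.getD u 0 + dx + 1))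
        else
          if hc : adj.contains ns[i] = true then                       -- (guard only for termination:
            machB adj ((ns[i], 0) :: (u, i) :: rest) (vis.insert ns[i] true)
              (if deps.contains ns[i] then deps else deps.insert ns[i] 0)
          else none                                                    --  Python raises the same KeyError one step later)
      else machB adj rest vis deps                                     -- frame exhausted
termination_by (unvisB adj vis, stackW adj st, st.length)
decreasing_by
  · -- deps[u] accumulation: same vis, strictly less remaining stack work
    apply Prod.Lex.right
    apply Prod.Lex.left
    simp only [stackW, List.map_cons, List.sum_cons, frameW, h]
    omega
  · -- descend into an unvisited neighbour: strictly fewer unvisited adj keys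
    exact Prod.Lex.left _ _ (unvisB_insert_lt adj vis hc (by simpa using ‹¬ _ = true›))
  · -- exhausted frame popped: same vis, same stack work, shorter stack
    have e : stackW adj ((u, i) :: rest) = stackW adj rest := by
      simp only [stackW, List.map_cons, List.sum_cons, frameW, h]
      omega
    rw [e]
    exact Prod.Lex.right _ (Prod.Lex.right _ (by simp))

def DFS_alt (adj : List (Int × List Int)) (vis : List (Int × Bool)) (s : Int) (deps : List (Int × Int)) : Int :=
  let adjD := PySem.Dict.ofList adj
  let visD := (PySem.Dict.ofList vis).insert s true                    -- vis[s] = True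
  let d0 := PySem.Dict.ofList deps
  let depsD := if d0.contains s then d0 else d0.insert s 0             -- if s not in deps: deps[s] = 0
  match machB adjD [(s, 0)] visD depsD with
  | some (_, d) => d.getD s 0                                          -- return deps[s]
  | none => 0

-- ===== PRECONDITION & SPEC =====
-- the neighbour list the dict lookup adj[u] yields ([] when u has no entry)
def pvNbrs (adj : List (Int × List Int)) (u : Int) : List Int :=
  ((PySem.Dict.ofList adj).get? u).getD []

-- the set of nodes the DFS explores: s plus everything reachable from it through
-- nodes that are not pre-visited (a reachability closure over the input graph)
def pvExplore (adj : List (Int × List Int)) (vis : List (Int × Bool)) (s : Int) : List Int :=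
  (List.range ((adj.flatMap (fun p => p.2)).length + 2)).foldl
    (fun E _ => PySem.Set.update E
      (E.flatMap (fun u => (pvNbrs adj u).filter (fun x => !decide (x ∈ vis.map Prod.fst)))))
    [s]

-- Pre_DFS holds exactly when Python A returns: every explored node has an adj entry, and
-- every pre-visited neighbour of an explored node has a deps entry (s gets one on entry).
-- (The first and third conjuncts restate closure facts of pvExplore so the proof can use them.)
def Pre_DFS (adj : List (Int × List Int)) (vis : List (Int × Bool)) (s : Int) (deps : List (Int × Int)) : Prop :=
  s ∈ pvExplore adj vis s ∧
  (∀ u ∈ pvExplore adj vis s, u ∈ adj.map Prod.fst) ∧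
  (∀ u ∈ pvExplore adj vis s, ∀ x ∈ pvNbrs adj u,
    x ∉ vis.map Prod.fst → x ∈ pvExplore adj vis s) ∧
  (∀ u ∈ pvExplore adj vis s, ∀ x ∈ pvNbrs adj u,
    x ∈ vis.map Prod.fst → x = s ∨ x ∈ deps.map Prod.fst)
instance (adj : List (Int × List Int)) (vis : List (Int × Bool)) (s : Int) (deps : List (Int × Int)) : Decidable (Pre_DFS adj vis s deps) := by unfold Pre_DFS; infer_instance

def pvWitness_DFS : (List (Int × List Int)) × (List (Int × Bool)) × Int × (List (Int × Int)) :=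
  ([(0, [1, 2]), (1, [2]), (2, [])], [], 0, [])

def Spec_DFS (adj : List (Int × List Int)) (vis : List (Int × Bool)) (s : Int) (deps : List (Int × Int)) (out : Int) : Prop := out = DFS_alt adj vis s deps
instance (adj : List (Int × List Int)) (vis : List (Int × Bool)) (s : Int) (deps : List (Int × Int)) (out : Int) : Decidable (Spec_DFS adj vis s deps out) := by unfold Spec_DFS; infer_instance

-- ===== CLAIM (what is proved, stated in full; the proofs are below) =====
def Claim_equal_DFS : Prop := ∀ (adj : List (Int × List Int)) (vis : List (Int × Bool)) (s : Int) (deps : List (Int × Int)), Dom_DFS adj vis s deps → Pre_DFS adj vis s deps → Spec_DFS adj vis s deps (DFS adj vis s deps)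

-- ===== LEMMAS AND PROOFS =====

-- inserting a vis key never increases the number of unvisited adj keys
theorem unvisB_insert_le (adj : PySem.Dict Int (List Int)) (vis : PySem.Dict Int Bool)
    (x : Int) (b : Bool) : unvisB adj (vis.insert x b) ≤ unvisB adj vis := by
  unfold unvisB
  refine List.Sublist.length_le (List.monotone_filter_right _ (fun a ha => ?_))
  simp only [Bool.not_eq_true'] at ha ⊢
  rw [PySem.Dict.contains_insert] at ha
  exact (Bool.or_eq_false_iff.1 ha).2


-- dicts built by ofList: keys, membership, items
theorem ofList_keys {ν : Type} (ps : List (Int × ν)) :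
    (PySem.Dict.ofList ps).keys = PySem.Set.ofList (ps.map Prod.fst) := by
  have h := PySem.Dict.keys_foldl_insert_key (ν := ν) ps Prod.fst (fun _ p => p.2)
    PySem.Dict.empty
  simpa [PySem.Dict.ofList, PySem.Dict.update, PySem.Set.ofList] using h

theorem set_foldl_add_len : ∀ (l : List Int) (s0 : PySem.Set Int),
    (List.foldl PySem.Set.add s0 l).length ≤ s0.length + l.length := by
  intro l
  induction l with
  | nil => intro s0; simp
  | cons x t ih =>
    intro s0
    have h1 : (PySem.Set.add s0 x).length ≤ s0.length + 1 := by
      unfold PySem.Set.add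
      split_ifs <;> simp
    have h2 := ih (PySem.Set.add s0 x)
    simp only [List.foldl_cons, List.length_cons]
    omega

theorem ofList_contains {ν : Type} (ps : List (Int × ν)) (k : Int) :
    (PySem.Dict.ofList ps).contains k = true ↔ k ∈ ps.map Prod.fst := by
  rw [PySem.Dict.contains_iff_mem_keys, ofList_keys]
  exact PySem.Set.mem_ofList _ _

-- re-inserting a key with its own value is a no-op (keys unique)
theorem insert_self_eq {d : PySem.Dict Int Int} {x : Int} {r : Int}
    (hnd : d.keys.Nodup) (h : d.get? x = some r) : d.insert x r = d := by
  have hc : d.contains x = true := by rw [PySem.Dict.contains_eq_isSome_get?, h]; rfl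
  apply PySem.Dict.ext
  rw [PySem.Dict.items_insert_of_contains d r hc]
  have : ∀ q ∈ d.items, (if (q.1 == x) = true then (x, r) else q) = q := by
    intro q hq
    by_cases hqx : (q.1 == x) = true
    · have hx : q.1 = x := by simpa using hqx
      have h2 : d.get? q.1 = some q.2 := PySem.Dict.get?_of_mem_items d (by simpa using hq) hnd
      rw [hx, h] at h2
      simp only [hqx, if_true]
      exact Prod.ext_iff.mpr ⟨hx.symm, Option.some.inj h2⟩
    · simp [hqx]
  rw [List.map_congr_left this]
  simp

theorem dfsA_contains {adj : PySem.Dict Int (List Int)} {f : Nat} {s : Int}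
    {vis : PySem.Dict Int Bool} {deps : PySem.Dict Int Int}
    (h : (dfsA adj f s vis deps).isSome) : adj.contains s = true := by
  cases f with
  | zero => rw [dfsA] at h; simp at h
  | succ g =>
    rw [dfsA] at h
    rcases hget : adj.get? s with _ | ns
    · rw [hget] at h; simp at h
    · rw [PySem.Dict.contains_eq_isSome_get?, hget]; rfl


-- one-step equations of B's machine
theorem machB_nil (adj : PySem.Dict Int (List Int)) (vis : PySem.Dict Int Bool)
    (deps : PySem.Dict Int Int) : machB adj [] vis deps = some (vis, deps) := by
  rw [machB]

theorem machB_pop {adj : PySem.Dict Int (List Int)} {u : Int} {i : Nat} {ns : List Int}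
    (rest : List (Int × Nat)) (vis : PySem.Dict Int Bool) (deps : PySem.Dict Int Int)
    (h : adj.get? u = some ns) (h2 : ¬ i < ns.length) :
    machB adj ((u, i) :: rest) vis deps = machB adj rest vis deps := by
  rw [machB]
  split
  · next heq => rw [h] at heq; cases heq
  · next ns' heq =>
    rw [h] at heq
    obtain rfl : ns = ns' := by injection heq
    rw [dif_neg h2]

theorem machB_acc {adj : PySem.Dict Int (List Int)} {u x : Int} {i : Nat} {ns : List Int}
    (rest : List (Int × Nat)) (vis : PySem.Dict Int Bool) (deps : PySem.Dict Int Int) {dx : Int}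
    (h : adj.get? u = some ns) (h2 : i < ns.length) (hxeq : ns[i] = x)
    (hv : vis.contains x = true) (hdx : deps.get? x = some dx) :
    machB adj ((u, i) :: rest) vis deps =
      machB adj ((u, i + 1) :: rest) vis (deps.insert u (deps.getD u 0 + dx + 1)) := by
  rw [machB]
  split
  · next heq => rw [h] at heq; cases heq
  · next ns' heq =>
    rw [h] at heq
    obtain rfl : ns = ns' := by injection heq
    rw [dif_pos h2]
    simp only [hxeq, hv, if_true, hdx]

theorem machB_push {adj : PySem.Dict Int (List Int)} {u x : Int} {i : Nat} {ns : List Int}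
    (rest : List (Int × Nat)) (vis : PySem.Dict Int Bool) (deps : PySem.Dict Int Int)
    (h : adj.get? u = some ns) (h2 : i < ns.length) (hxeq : ns[i] = x)
    (hv : vis.contains x = false) (hc : adj.contains x = true) :
    machB adj ((u, i) :: rest) vis deps =
      machB adj ((x, 0) :: (u, i) :: rest) (vis.insert x true)
        (if deps.contains x then deps else deps.insert x 0) := by
  rw [machB]
  split
  · next heq => rw [h] at heq; cases heq
  · next ns' heq =>
    rw [h] at heq
    obtain rfl : ns = ns' := by injection heq
    rw [dif_pos h2]
    simp only [hxeq, hv, Bool.false_eq_true, if_false, dif_pos hc]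

-- preservation facts about A's recursion (used by sufficiency and the simulation)
def PRecStmt (adj : PySem.Dict Int (List Int)) (f : Nat) : Prop :=
  ∀ s vis deps v' d', dfsA adj f s vis deps = some (v', d') →
    (∀ k, vis.contains k = true → v'.contains k = true) ∧
    (∀ k, deps.contains k = true → d'.contains k = true) ∧
    v'.contains s = true ∧ d'.contains s = true ∧
    (∀ Q : Int → Prop, (∀ k, vis.contains k = true → deps.contains k = true ∨ Q k) →
      ∀ k, v'.contains k = true → d'.contains k = true ∨ Q k) ∧
    (deps.keys.Nodup → d'.keys.Nodup) ∧
    unvisB adj v' ≤ unvisB adj (vis.insert s true)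

def PLoopStmt (adj : PySem.Dict Int (List Int)) (f : Nat) : Prop :=
  ∀ s xs vis deps v' d', loopA adj f s xs vis deps = some (v', d') →
    (∀ k, vis.contains k = true → v'.contains k = true) ∧
    (∀ k, deps.contains k = true → d'.contains k = true) ∧
    (∀ Q : Int → Prop, (∀ k, vis.contains k = true → deps.contains k = true ∨ Q k) →
      ∀ k, v'.contains k = true → d'.contains k = true ∨ Q k) ∧
    (deps.keys.Nodup → d'.keys.Nodup) ∧
    unvisB adj v' ≤ unvisB adj vis

theorem pres (adj : PySem.Dict Int (List Int)) : ∀ f, PRecStmt adj f ∧ PLoopStmt adj f := by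
  intro f
  induction f using Nat.strong_induction_on with
  | _ f IH =>
    have hrec : PRecStmt adj f := by
      intro s vis deps v' d' hrun
      cases f with
      | zero => rw [dfsA] at hrun; cases hrun
      | succ g =>
        rw [dfsA] at hrun
        rcases hget : adj.get? s with _ | ns
        · simp only [hget] at hrun
          simp at hrun
        · simp only [hget] at hrun
          by_cases hns : ns = []
          · simp only [hns, if_true, Option.some.injEq, Prod.mk.injEq] at hrun
            obtain ⟨h1, h2⟩ := hrun
            subst h1; subst h2
            refine ⟨fun k hk => ?_, fun k hk => ?_, ?_, ?_, ?_, ?_, le_refl _⟩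
            · rw [PySem.Dict.contains_insert]; simp [hk]
            · by_cases hsd : deps.contains s = true <;>
                simp [hsd, PySem.Dict.contains_insert, hk]
            · rw [PySem.Dict.contains_insert]; simp
            · by_cases hsd : deps.contains s = true <;>
                simp [hsd, PySem.Dict.contains_insert]
            · intro Q himp k hk
              rw [PySem.Dict.contains_insert] at hk
              rcases Bool.or_eq_true_iff.1 hk with hks | hkv
              · have hks' : k = s := by simpa using hks
                subst hks'
                refine Or.inl ?_
                by_cases hsd : deps.contains k = true <;>
                  simp [hsd, PySem.Dict.contains_insert]
              · rcases himp k hkv with hdk | hq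
                · refine Or.inl ?_
                  by_cases hsd : deps.contains s = true <;>
                    simp [hsd, PySem.Dict.contains_insert, hdk]
                · exact Or.inr hq
            · intro hnd
              by_cases hsd : deps.contains s = true <;>
                simp [hsd, PySem.Dict.nodup_keys_insert _ _ _ hnd, hnd]
          · simp only [if_neg hns] at hrun
            obtain ⟨m1, m2, m3, m4, m5⟩ :=
              ((IH g (by omega)).2 : PLoopStmt adj g) s ns _ _ v' d' hrun
            have entvis : ∀ k, vis.contains k = true → (vis.insert s true).contains k = true := by
              intro k hk; rw [PySem.Dict.contains_insert]; simp [hk]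
            have entdeps : ∀ k, deps.contains k = true →
                (if deps.contains s = true then deps else deps.insert s 0).contains k = true := by
              intro k hk
              by_cases hsd : deps.contains s = true <;>
                simp [hsd, PySem.Dict.contains_insert, hk]
            refine ⟨fun k hk => m1 k (entvis k hk), fun k hk => m2 k (entdeps k hk), ?_, ?_, ?_, ?_, m5⟩
            · exact m1 s (by rw [PySem.Dict.contains_insert]; simp)
            · refine m2 s ?_
              by_cases hsd : deps.contains s = true <;>
                simp [hsd, PySem.Dict.contains_insert]
            · intro Q himp k hk
              refine m3 Q ?_ k hk
              intro k' hk'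
              rw [PySem.Dict.contains_insert] at hk'
              rcases Bool.or_eq_true_iff.1 hk' with hks | hkv
              · have hks' : k' = s := by simpa using hks
                subst hks'
                refine Or.inl ?_
                by_cases hsd : deps.contains k' = true <;>
                  simp [hsd, PySem.Dict.contains_insert]
              · rcases himp k' hkv with hdk | hq
                · refine Or.inl ?_
                  by_cases hsd : deps.contains s = true <;>
                    simp [hsd, PySem.Dict.contains_insert, hdk]
                · exact Or.inr hq
            · intro hnd
              refine m4 ?_
              by_cases hsd : deps.contains s = true <;>
                simp [hsd, PySem.Dict.nodup_keys_insert _ _ _ hnd, hnd]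
    have hloop : PLoopStmt adj f := by
      intro s xs
      induction xs with
      | nil =>
        intro vis deps v' d' hrun
        rw [loopA] at hrun
        simp only [Option.some.injEq, Prod.mk.injEq] at hrun
        obtain ⟨h1, h2⟩ := hrun
        subst h1; subst h2
        exact ⟨fun _ h => h, fun _ h => h, fun _ h => h, fun h => h, le_refl _⟩
      | cons x t ih =>
        intro vis deps v' d' hrun
        rw [loopA] at hrun
        by_cases hvx : vis.contains x = true
        · rcases hdx : deps.get? x with _ | dx
          · simp only [hvx, if_true, hdx] at hrun
            simp at hrun
          · simp only [hvx, if_true, hdx] at hrun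
            obtain ⟨m1, m2, m3, m4, m5⟩ := ih _ _ v' d' hrun
            refine ⟨m1, fun k hk => m2 k (by simp [PySem.Dict.contains_insert, hk]), ?_, ?_, m5⟩
            · intro Q himp k hk
              refine m3 Q ?_ k hk
              intro k' hk'
              rcases himp k' hk' with hdk | hq
              · exact Or.inl (by simp [PySem.Dict.contains_insert, hdk])
              · exact Or.inr hq
            · intro hnd
              exact m4 (PySem.Dict.nodup_keys_insert _ _ _ hnd)
        · have hvx' : vis.contains x = false := by simpa using hvx
          rcases hd : dfsA adj f x vis deps with _ | ⟨v1, d1⟩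
          · simp only [hvx', Bool.false_eq_true, if_false, hd] at hrun
            simp at hrun
          · simp only [hvx', Bool.false_eq_true, if_false, hd] at hrun
            obtain ⟨p1, p2, p3, p4, p5, p6, p7⟩ := hrec x vis deps v1 d1 hd
            obtain ⟨m1, m2, m3, m4, m5⟩ := ih _ _ v' d' hrun
            refine ⟨fun k hk => m1 k (p1 k hk),
                    fun k hk => m2 k (by simp [PySem.Dict.contains_insert, p2 k hk]), ?_, ?_, ?_⟩
            · intro Q himp k hk
              refine m3 Q ?_ k hk
              intro k' hk'
              rcases p5 Q himp k' hk' with hdk | hq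
              · exact Or.inl (by simp [PySem.Dict.contains_insert, hdk])
              · exact Or.inr hq
            · intro hnd
              exact m4 (PySem.Dict.nodup_keys_insert _ _ _
                (PySem.Dict.nodup_keys_insert _ _ _ (p6 hnd)))
            · have h1 : unvisB adj v1 ≤ unvisB adj vis :=
                le_trans p7 (unvisB_insert_le adj vis x true)
              exact le_trans m5 h1
    exact ⟨hrec, hloop⟩

-- sufficiency: under the precondition the fuel never runs out (E = the explored set)
theorem suffRec (adj : PySem.Dict Int (List Int)) (visO : PySem.Dict Int Bool)
    (depsO : PySem.Dict Int Int) (s0 : Int) (E : Int → Prop)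
    (hE1 : ∀ u, E u → adj.contains u = true)
    (hE2 : ∀ u ns, E u → adj.get? u = some ns → ∀ x ∈ ns, visO.contains x = false → E x)
    (hE3 : ∀ u ns, E u → adj.get? u = some ns → ∀ x ∈ ns,
      visO.contains x = true → x = s0 ∨ depsO.contains x = true) :
    ∀ f s vis deps, E s →
      (∀ k, visO.contains k = true → vis.contains k = true) →
      (∀ k, vis.contains k = true →
        deps.contains k = true ∨ (visO.contains k = true ∧ depsO.contains k = false)) →
      (∀ k, depsO.contains k = true → deps.contains k = true) →
      (s = s0 ∨ deps.contains s0 = true) →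
      unvisB adj (vis.insert s true) < f →
      (dfsA adj f s vis deps).isSome := by
  intro f
  induction f using Nat.strong_induction_on with
  | _ f IH =>
    intro s vis deps hsE hI0 hI1 hI2 hI3 hfuel
    cases f with
    | zero => omega
    | succ g =>
      rw [dfsA]
      obtain ⟨ns, hget⟩ : ∃ ns, adj.get? s = some ns := by
        have := hE1 s hsE
        rw [PySem.Dict.contains_eq_isSome_get?] at this
        exact Option.isSome_iff_exists.1 this
      have hJ0 : ∀ k, visO.contains k = true → (vis.insert s true).contains k = true := by
        intro k hk
        simp [PySem.Dict.contains_insert, hI0 k hk]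
      have hJ1 : ∀ k, (vis.insert s true).contains k = true →
          (if deps.contains s = true then deps else deps.insert s 0).contains k = true ∨
            (visO.contains k = true ∧ depsO.contains k = false) := by
        intro k hk
        rw [PySem.Dict.contains_insert] at hk
        rcases Bool.or_eq_true_iff.1 hk with hks | hkv
        · have hks' : k = s := by simpa using hks
          subst hks'
          refine Or.inl ?_
          by_cases hsd : deps.contains k = true <;>
            simp [hsd, PySem.Dict.contains_insert]
        · rcases hI1 k hkv with hdk | hq
          · refine Or.inl ?_
            by_cases hsd : deps.contains s = true <;>
              simp [hsd, PySem.Dict.contains_insert, hdk]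
          · exact Or.inr hq
      have hJ2 : ∀ k, depsO.contains k = true →
          (if deps.contains s = true then deps else deps.insert s 0).contains k = true := by
        intro k hk
        by_cases hsd : deps.contains s = true <;>
          simp [hsd, PySem.Dict.contains_insert, hI2 k hk]
      have hJ3 : (if deps.contains s = true then deps else deps.insert s 0).contains s0 = true := by
        rcases hI3 with rfl | hd
        · by_cases hsd : deps.contains s = true <;>
            simp [hsd, PySem.Dict.contains_insert]
        · by_cases hsd : deps.contains s = true <;>
            simp [hsd, PySem.Dict.contains_insert, hd]
      have hxsall : ∀ x ∈ ns, (visO.contains x = false → E x) ∧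
          (visO.contains x = true → x = s0 ∨ depsO.contains x = true) :=
        fun x hx => ⟨fun hv => hE2 s ns hsE hget x hx hv, fun hv => hE3 s ns hsE hget x hx hv⟩
      have hloop : ∀ xs, (∀ x ∈ xs, (visO.contains x = false → E x) ∧
            (visO.contains x = true → x = s0 ∨ depsO.contains x = true)) →
          ∀ vis' deps',
            (∀ k, visO.contains k = true → vis'.contains k = true) →
            (∀ k, vis'.contains k = true →
              deps'.contains k = true ∨ (visO.contains k = true ∧ depsO.contains k = false)) →
            (∀ k, depsO.contains k = true → deps'.contains k = true) →
            deps'.contains s0 = true →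
            unvisB adj vis' ≤ g → (loopA adj g s xs vis' deps').isSome := by
        intro xs
        induction xs with
        | nil =>
          intro _ vis' deps' _ _ _ _ _
          rw [loopA]
          rfl
        | cons x t iht =>
          intro hxs vis' deps' hK0 hK1 hK2 hK3 hg
          rw [loopA]
          by_cases hvx : vis'.contains x = true
          · obtain ⟨dx, hdx⟩ : ∃ dx, deps'.get? x = some dx := by
              have hcx : deps'.contains x = true := by
                rcases hK1 x hvx with hdk | ⟨hvo, hdo⟩
                · exact hdk
                · rcases (hxs x List.mem_cons_self).2 hvo with rfl | hdo'
                  · exact hK3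
                  · rw [hdo'] at hdo; cases hdo
              rw [PySem.Dict.contains_eq_isSome_get?] at hcx
              exact Option.isSome_iff_exists.1 hcx
            simp only [hvx, if_true, hdx]
            refine iht (fun y hy => hxs y (List.mem_cons_of_mem _ hy)) vis' _ hK0 ?_ ?_ ?_ hg
            · intro k hk
              rcases hK1 k hk with hdk | hq
              · exact Or.inl (by simp [PySem.Dict.contains_insert, hdk])
              · exact Or.inr hq
            · intro k hk
              simp [PySem.Dict.contains_insert, hK2 k hk]
            · simp [PySem.Dict.contains_insert, hK3]
          · have hvx' : vis'.contains x = false := by simpa using hvx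
            have hvox : visO.contains x = false := by
              rcases Bool.eq_false_or_eq_true (visO.contains x) with h0 | h0
              · rw [hK0 x h0] at hvx'; cases hvx'
              · exact h0
            have hxE : E x := (hxs x List.mem_cons_self).1 hvox
            have hcx : adj.contains x = true := hE1 x hxE
            have hlt : unvisB adj (vis'.insert x true) < g :=
              lt_of_lt_of_le (unvisB_insert_lt adj vis' hcx hvx') hg
            have hrec := IH g (by omega) x vis' deps' hxE hK0 hK1 hK2 (Or.inr hK3) hlt
            obtain ⟨⟨v1, d1⟩, hd⟩ := Option.isSome_iff_exists.1 hrec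
            simp only [hvx', Bool.false_eq_true, if_false, hd]
            obtain ⟨p1, p2, p3, p4, p5, p6, p7⟩ := (pres adj g).1 x vis' deps' v1 d1 hd
            refine iht (fun y hy => hxs y (List.mem_cons_of_mem _ hy)) v1 _
              (fun k hk => p1 k (hK0 k hk)) ?_ ?_ ?_ ?_
            · intro k hk
              rcases p5 _ hK1 k hk with hdk | hq
              · exact Or.inl (by simp [PySem.Dict.contains_insert, hdk])
              · exact Or.inr hq
            · intro k hk
              simp [PySem.Dict.contains_insert, p2 k (hK2 k hk)]
            · simp [PySem.Dict.contains_insert, p2 s0 hK3]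
            · have h1 : unvisB adj v1 ≤ unvisB adj (vis'.insert x true) := p7
              omega
      simp only [hget]
      by_cases hns : ns = []
      · simp [hns]
      · simp only [if_neg hns]
        exact hloop ns hxsall _ _ hJ0 hJ1 hJ2 hJ3 (by omega)

-- the simulation: B's stack machine runs A's recursion
def SimRecStmt (adj : PySem.Dict Int (List Int)) (f : Nat) : Prop :=
  ∀ s vis deps v' d', dfsA adj f s vis deps = some (v', d') → deps.keys.Nodup →
    ∀ rest, machB adj ((s, 0) :: rest) (vis.insert s true)
        (if deps.contains s then deps else deps.insert s 0) = machB adj rest v' d'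

def SimLoopStmt (adj : PySem.Dict Int (List Int)) (f : Nat) : Prop :=
  ∀ s ns, adj.get? s = some ns →
    ∀ xs i vis deps v' d', xs = ns.drop i →
      loopA adj f s xs vis deps = some (v', d') → deps.keys.Nodup →
      ∀ rest, machB adj ((s, i) :: rest) vis deps = machB adj rest v' d'

theorem sim (adj : PySem.Dict Int (List Int)) : ∀ f, SimRecStmt adj f ∧ SimLoopStmt adj f := by
  intro f
  induction f using Nat.strong_induction_on with
  | _ f IH =>
    have hrec : SimRecStmt adj f := by
      intro s vis deps v' d' hrun hnd rest
      cases f with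
      | zero => rw [dfsA] at hrun; cases hrun
      | succ g =>
        rw [dfsA] at hrun
        rcases hget : adj.get? s with _ | ns
        · simp only [hget] at hrun
          simp at hrun
        · simp only [hget] at hrun
          by_cases hns : ns = []
          · simp only [hns, if_true, Option.some.injEq, Prod.mk.injEq] at hrun
            obtain ⟨h1, h2⟩ := hrun
            subst h1; subst h2
            rw [machB_pop rest _ _ hget (by simp [hns])]
          · simp only [if_neg hns] at hrun
            refine ((IH g (by omega)).2 : SimLoopStmt adj g) s ns hget ns 0 _ _ v' d'
              (by simp) hrun ?_ rest
            by_cases hsd : deps.contains s = true <;>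
              simp [hsd, PySem.Dict.nodup_keys_insert _ _ _ hnd, hnd]
    have hloop : SimLoopStmt adj f := by
      intro s ns hns xs
      induction xs with
      | nil =>
        intro i vis deps v' d' hxs hrun hnd rest
        rw [loopA] at hrun
        simp only [Option.some.injEq, Prod.mk.injEq] at hrun
        obtain ⟨h1, h2⟩ := hrun
        subst h1; subst h2
        refine machB_pop rest _ _ hns ?_
        have := congrArg List.length hxs
        simp [List.length_drop] at this
        omega
      | cons x t ih =>
        intro i vis deps v' d' hxs hrun hnd rest
        have hi : i < ns.length := by
          have := congrArg List.length hxs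
          simp [List.length_drop] at this
          omega
        have hdc := List.drop_eq_getElem_cons hi
        rw [← hxs] at hdc
        have hx : ns[i] = x := (List.cons_eq_cons.mp hdc).1.symm
        have hxs2 : t = ns.drop (i + 1) := (List.cons_eq_cons.mp hdc).2
        rw [loopA] at hrun
        by_cases hvx : vis.contains x = true
        · rcases hdx : deps.get? x with _ | dx
          · simp only [hvx, if_true, hdx] at hrun
            simp at hrun
          · simp only [hvx, if_true, hdx] at hrun
            rw [machB_acc rest vis deps hns hi hx hvx hdx]
            exact ih (i + 1) vis _ v' d' hxs2 hrun
              (PySem.Dict.nodup_keys_insert _ _ _ hnd) rest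
        · have hvx' : vis.contains x = false := by simpa using hvx
          rcases hd : dfsA adj f x vis deps with _ | ⟨v1, d1⟩
          · simp only [hvx', Bool.false_eq_true, if_false, hd] at hrun
            simp at hrun
          · simp only [hvx', Bool.false_eq_true, if_false, hd] at hrun
            have hcx : adj.contains x = true := dfsA_contains (by rw [hd]; rfl)
            obtain ⟨p1, p2, p3, p4, p5, p6, p7⟩ := (pres adj f).1 x vis deps v1 d1 hd
            obtain ⟨rv, hrv⟩ : ∃ rv, d1.get? x = some rv := by
              have := p4
              rw [PySem.Dict.contains_eq_isSome_get?] at this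
              exact Option.isSome_iff_exists.1 this
            have hr : d1.getD x 0 = rv := by
              rw [PySem.Dict.getD_eq_get?_getD, hrv]
              rfl
            have hnoop : d1.insert x rv = d1 := insert_self_eq (p6 hnd) hrv
            rw [hr, hnoop] at hrun
            rw [machB_push rest vis deps hns hi hx hvx' hcx]
            rw [hrec x vis deps v1 d1 hd hnd ((s, i) :: rest)]
            rw [machB_acc rest v1 d1 hns hi hx p3 hrv]
            exact ih (i + 1) v1 _ v' d' hxs2 hrun
              (PySem.Dict.nodup_keys_insert _ _ _ (p6 hnd)) rest
    exact ⟨hrec, hloop⟩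

-- ===== VERDICT (by name: the statement is the Claim_ definition above) =====
theorem DFS_spec : Claim_equal_DFS := by
  intro adj vis s deps _ hpre
  obtain ⟨hsE0, hP1, hP2, hP3⟩ := hpre
  unfold Spec_DFS
  have hE1 : ∀ u, u ∈ pvExplore adj vis s → (PySem.Dict.ofList adj).contains u = true :=
    fun u hu => (ofList_contains adj u).2 (hP1 u hu)
  have hE2 : ∀ u ns, u ∈ pvExplore adj vis s → (PySem.Dict.ofList adj).get? u = some ns →
      ∀ x ∈ ns, (PySem.Dict.ofList vis).contains x = false → x ∈ pvExplore adj vis s := by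
    intro u ns hu hget x hx hvx
    have hnb : x ∈ pvNbrs adj u := by
      unfold pvNbrs
      rw [hget]
      exact hx
    refine hP2 u hu x hnb ?_
    intro hmem
    rw [(ofList_contains vis x).2 hmem] at hvx
    cases hvx
  have hE3 : ∀ u ns, u ∈ pvExplore adj vis s → (PySem.Dict.ofList adj).get? u = some ns →
      ∀ x ∈ ns, (PySem.Dict.ofList vis).contains x = true →
        x = s ∨ (PySem.Dict.ofList deps).contains x = true := by
    intro u ns hu hget x hx hvx
    have hnb : x ∈ pvNbrs adj u := by
      unfold pvNbrs
      rw [hget]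
      exact hx
    rcases hP3 u hu x hnb ((ofList_contains vis x).1 hvx) with h | h
    · exact Or.inl h
    · exact Or.inr ((ofList_contains deps x).2 h)
  have hkeys : (PySem.Dict.ofList adj).keys.length ≤ adj.length := by
    rw [ofList_keys]
    have h1 := set_foldl_add_len (adj.map Prod.fst) PySem.Set.empty
    have h2 : (adj.map Prod.fst).length = adj.length := List.length_map _
    simpa [PySem.Set.ofList, PySem.Set.empty, h2] using h1
  have hfuel : unvisB (PySem.Dict.ofList adj)
      (((PySem.Dict.ofList vis)).insert s true) < adj.length + 1 := by
    have hle := List.length_filter_le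
      (fun k => !((PySem.Dict.ofList vis).insert s true).contains k)
      (PySem.Dict.ofList adj).keys
    unfold unvisB
    omega
  have hsome := suffRec (PySem.Dict.ofList adj) (PySem.Dict.ofList vis)
    (PySem.Dict.ofList deps) s (fun u => u ∈ pvExplore adj vis s) hE1 hE2 hE3
    (adj.length + 1) s (PySem.Dict.ofList vis) (PySem.Dict.ofList deps) hsE0
    (fun _ hk => hk)
    (fun k hk => by
      rcases Bool.eq_false_or_eq_true ((PySem.Dict.ofList deps).contains k) with h0 | h0
      · exact Or.inl h0
      · exact Or.inr ⟨hk, h0⟩)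
    (fun _ hk => hk) (Or.inl rfl) hfuel
  obtain ⟨⟨v', d'⟩, hrun⟩ := Option.isSome_iff_exists.1 hsome
  have hsim := (sim (PySem.Dict.ofList adj) (adj.length + 1)).1 s
    (PySem.Dict.ofList vis) (PySem.Dict.ofList deps) v' d' hrun
    (PySem.Dict.nodup_keys_ofList deps) []
  rw [machB_nil] at hsim
  show DFS adj vis s deps = DFS_alt adj vis s deps
  unfold DFS DFS_alt
  simp only [hrun, hsim]
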